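-- pv_equiv track=rewrite | github.com/qqqqlss/Python-coding-test | 야간 전술보행.py | solution
-- ===== SOURCE A (Python) =====
-- def solution(distance, scope, times):
--     answer = 0
--     s = sorted(zip(scope,times),key = lambda x : min(x[0]))
--     for tmp,time in s:
--         front,back = min(tmp),max(tmp)
--         p = sum(time)
--         for x in range(front,back+1):
--             if x%p > 0 and x%p <= time[0]:
--                 return x
--             else:
--                 continue
--     return distance
-- ===== SOURCE B (Python) =====
-- def solution(distance, scope, times):
--     # For each guard scope (in order of increasing min(scope)), compute arithmetically
--     # the first x in [front, back] with x % p in [1, time[0]] instead of scanning the range.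
--     for sc, tm in sorted(zip(scope, times), key=lambda z: min(z[0])):
--         front, back = min(sc), max(sc)
--         p, t0 = sum(tm), tm[0]
--         if p > 0 and t0 > 0:
--             hi = min(t0, p - 1)
--             if hi >= 1:
--                 r = front % p
--                 if 1 <= r <= hi:
--                     x = front
--                 elif r == 0:
--                     x = front + 1
--                 else:
--                     x = front + (p - r) + 1
--                 if x <= back:
--                     return x
--     return distance
-- ===== Notes on version B (the rewrite author's own statement) =====
-- stated objective: faster
-- what changed: Per guard scope, B computes the first qualifying position arithmetically from front % p instead of A's linear scan over range(front, back+1), removing the O(range-length) inner loop.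
-- outside the precondition, e.g. on solution(5, [[1], [2]], [[2, 0], [0]]): A returns 1, B returns 1
import Mathlib
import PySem

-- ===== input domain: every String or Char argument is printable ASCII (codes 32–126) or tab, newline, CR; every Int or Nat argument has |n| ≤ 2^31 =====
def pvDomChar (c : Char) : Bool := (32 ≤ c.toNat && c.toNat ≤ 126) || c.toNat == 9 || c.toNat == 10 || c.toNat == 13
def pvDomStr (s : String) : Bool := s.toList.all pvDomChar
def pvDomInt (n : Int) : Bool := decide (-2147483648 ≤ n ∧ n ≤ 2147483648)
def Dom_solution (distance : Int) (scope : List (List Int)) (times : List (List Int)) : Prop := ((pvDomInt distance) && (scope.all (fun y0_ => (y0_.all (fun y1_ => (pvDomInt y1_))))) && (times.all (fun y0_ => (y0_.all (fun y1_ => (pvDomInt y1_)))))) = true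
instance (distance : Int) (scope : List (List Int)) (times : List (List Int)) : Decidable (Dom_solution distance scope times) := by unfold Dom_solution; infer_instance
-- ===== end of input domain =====

-- B replaces A's linear scan of range(front, back+1) by a per-scope arithmetic computation of
-- the first qualifying position (objective: faster). Equivalence is proved on Pre_solution.

-- ===== PORT A =====
-- inner loop 'for x in range(front, back+1): if x%p > 0 and x%p <= time[0]: return x'
-- lazy scan of x = a, a+1, …, b-1 (Python's range is a lazy iterator, so the loop is
-- ported as a recursion over the current x, not over a materialised list)
def pvScanA (p t0 a b : Int) : Option Int :=
  if h : a < b then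
    if 0 < PySem.Int.mod a p ∧ PySem.Int.mod a p ≤ t0 then some a
    else pvScanA p t0 (a + 1) b
  else none
termination_by (b - a).toNat
decreasing_by omega

-- outer loop 'for tmp, time in s'; min/max/time[0] via .getD 0 — exact under Pre_ (lists nonempty)
def pvLoopA (distance : Int) : List (List Int × List Int) → Int
  | [] => distance
  | (tmp, time) :: rest =>
    let front := (PySem.List.min? tmp (fun y => y)).getD 0
    let back := (PySem.List.max? tmp (fun y => y)).getD 0
    let p := time.sum
    match pvScanA p ((PySem.List.pyGet? time 0).getD 0) front (back + 1) with
    | some x => x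
    | none => pvLoopA distance rest

def solution (distance : Int) (scope : List (List Int)) (times : List (List Int)) : Int :=
  pvLoopA distance
    (PySem.List.sorted (scope.zip times) (fun z => (PySem.List.min? z.1 (fun y => y)).getD 0) false)

-- ===== PORT B =====
def pvLoopB (distance : Int) : List (List Int × List Int) → Int
  | [] => distance
  | (sc, tm) :: rest =>
    let front := (PySem.List.min? sc (fun y => y)).getD 0
    let back := (PySem.List.max? sc (fun y => y)).getD 0
    let p := tm.sum
    let t0 := (PySem.List.pyGet? tm 0).getD 0
    if 0 < p ∧ 0 < t0 then
      let hi := min t0 (p - 1)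
      if 1 ≤ hi then
        let r := PySem.Int.mod front p
        let x := if 1 ≤ r ∧ r ≤ hi then front
                 else if r = 0 then front + 1
                 else front + (p - r) + 1
        if x ≤ back then x else pvLoopB distance rest
      else pvLoopB distance rest
    else pvLoopB distance rest

def solution_alt (distance : Int) (scope : List (List Int)) (times : List (List Int)) : Int :=
  pvLoopB distance
    (PySem.List.sorted (scope.zip times) (fun z => (PySem.List.min? z.1 (fun y => y)).getD 0) false)

-- ===== PRECONDITION & SPEC =====
-- Pre_ excludes the inputs where A raises: an empty scope/times sublist (min/max/time[0] raise
-- ValueError/IndexError) and a times sublist summing to 0 (x % 0 raises ZeroDivisionError).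
-- This excludes a few inputs where A still returns (a zero-sum scope occurring only AFTER an
-- earlier scope already returned is never reached by A) — see claim.json "cites".
def Pre_solution (distance : Int) (scope : List (List Int)) (times : List (List Int)) : Prop :=
  ∀ z ∈ scope.zip times, z.1 ≠ [] ∧ z.2 ≠ [] ∧ z.2.sum ≠ 0
instance (distance : Int) (scope : List (List Int)) (times : List (List Int)) : Decidable (Pre_solution distance scope times) := by unfold Pre_solution; infer_instance

def pvWitness_solution : Int × List (List Int) × List (List Int) :=
  (10, [[4, 6], [1, 2]], [[1, 3], [2, 5]])

def Spec_solution (distance : Int) (scope : List (List Int)) (times : List (List Int)) (out : Int) : Prop := out = solution_alt distance scope times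
instance (distance : Int) (scope : List (List Int)) (times : List (List Int)) (out : Int) : Decidable (Spec_solution distance scope times out) := by unfold Spec_solution; infer_instance

-- ===== CLAIM (what is proved, stated in full; the proofs are below) =====
def Claim_equal_solution : Prop := ∀ (distance : Int) (scope : List (List Int)) (times : List (List Int)), Dom_solution distance scope times → Pre_solution distance scope times → Spec_solution distance scope times (solution distance scope times)

-- ===== LEMMAS AND PROOFS =====

-- the first position B computes for a scope starting at a (p ≥ 2, t0 ≥ 1 case)
def pvFx (p t0 a : Int) : Int :=
  if 1 ≤ PySem.Int.mod a p ∧ PySem.Int.mod a p ≤ min t0 (p - 1) then a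
  else if PySem.Int.mod a p = 0 then a + 1
  else a + (p - PySem.Int.mod a p) + 1

lemma pvScanA_none (p t0 : Int)
    (h : ∀ x : Int, ¬(0 < PySem.Int.mod x p ∧ PySem.Int.mod x p ≤ t0)) :
    ∀ (n : Nat) (a b : Int), (b - a).toNat ≤ n → pvScanA p t0 a b = none := by
  intro n
  induction n with
  | zero =>
    intro a b hn
    rw [pvScanA, dif_neg (by omega)]
  | succ m ih =>
    intro a b hn
    by_cases hab : a < b
    · rw [pvScanA, dif_pos hab, if_neg (h a)]
      exact ih (a + 1) b (by omega)
    · rw [pvScanA, dif_neg hab]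

lemma pvFx_ge (p t0 a : Int) (hp : 0 < p) : a ≤ pvFx p t0 a := by
  have := PySem.Int.mod_lt a hp
  unfold pvFx; split_ifs <;> omega

lemma pvFx_succ (p t0 a : Int) (hp : 1 < p) (ht : 0 < t0)
    (h : ¬(0 < PySem.Int.mod a p ∧ PySem.Int.mod a p ≤ t0)) :
    pvFx p t0 (a + 1) = pvFx p t0 a := by
  have hm : PySem.Int.mod a p = a % p := PySem.Int.mod_eq_emod_of_pos (by omega)
  have hm1 : PySem.Int.mod (a + 1) p = (a + 1) % p := PySem.Int.mod_eq_emod_of_pos (by omega)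
  have h1 : 0 ≤ a % p := Int.emod_nonneg a (by omega)
  have h2 : a % p < p := Int.emod_lt_of_pos a (by omega)
  have hsucc : (a + 1) % p = if a % p = p - 1 then 0 else a % p + 1 := by
    rw [Int.add_emod, Int.emod_eq_of_lt (by omega) (by omega : (1:Int) < p)]
    split_ifs with hc
    · rw [hc, show p - 1 + 1 = p from by ring, Int.emod_self]
    · exact Int.emod_eq_of_lt (by omega) (by omega)
  rw [hm] at h
  have hm2 : min t0 (p - 1) ≤ t0 := min_le_left _ _
  have hm3 : min t0 (p - 1) ≤ p - 1 := min_le_right _ _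
  have hm4 : (1:Int) ≤ min t0 (p - 1) := le_min (by omega) (by omega)
  simp only [pvFx, hm, hm1, hsucc]
  split_ifs <;> omega

lemma pvScanA_range (p t0 : Int) (hp : 1 < p) (ht : 0 < t0) :
    ∀ (n : Nat) (a b : Int), (b - a).toNat ≤ n →
    pvScanA p t0 a b = (if pvFx p t0 a < b then some (pvFx p t0 a) else none) := by
  intro n
  induction n with
  | zero =>
    intro a b hn
    rw [pvScanA, dif_neg (by omega), if_neg (by have := pvFx_ge p t0 a (by omega); omega)]
  | succ m ih =>
    intro a b hn
    by_cases hab : a < b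
    · rw [pvScanA, dif_pos hab]
      by_cases hc : 0 < PySem.Int.mod a p ∧ PySem.Int.mod a p ≤ t0
      · rw [if_pos hc]
        have hlt := PySem.Int.mod_lt a (show (0:Int) < p by omega)
        have hfx : pvFx p t0 a = a := by
          rw [pvFx, if_pos ⟨by omega, by exact le_min (by omega) (by omega)⟩]
        rw [hfx, if_pos hab]
      · rw [if_neg hc, ih (a + 1) b (by omega), pvFx_succ p t0 a hp ht hc]
    · rw [pvScanA, dif_neg hab, if_neg (by have := pvFx_ge p t0 a (by omega); omega)]

lemma pvLoop_eq (distance : Int) (l : List (List Int × List Int))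
    (h : ∀ z ∈ l, z.2.sum ≠ 0) : pvLoopA distance l = pvLoopB distance l := by
  induction l with
  | nil => rfl
  | cons z rest ih =>
    obtain ⟨sc, tm⟩ := z
    have hp : tm.sum ≠ 0 := h (sc, tm) (by simp)
    have ih' := ih (fun y hy => h y (List.mem_cons_of_mem _ hy))
    simp only [pvLoopA, pvLoopB]
    set front := (PySem.List.min? sc (fun y => y)).getD 0 with hfront
    set back := (PySem.List.max? sc (fun y => y)).getD 0 with hback
    set p := tm.sum with hpdef
    set t0 := (PySem.List.pyGet? tm 0).getD 0 with ht0
    rcases lt_trichotomy p 0 with hneg | hzero | hpos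
    · -- p < 0 : every x % p ≤ 0, the scan finds nothing; B skips the scope
      rw [pvScanA_none p t0 (fun x => by
        have := PySem.Int.mod_neg_bounds x hneg; omega) ((back + 1 - front).toNat) front (back + 1) le_rfl]
      rw [if_neg (by omega)]
      exact ih'
    · exact absurd hzero hp
    · by_cases ht : 0 < t0
      · by_cases hp1 : p = 1
        · -- p = 1 : x % 1 = 0 is never positive; B's hi = 0
          rw [pvScanA_none p t0 (fun x => by
            have h1 := PySem.Int.mod_nonneg x hpos
            have h2 := PySem.Int.mod_lt x hpos
            omega) ((back + 1 - front).toNat) front (back + 1) le_rfl]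
          rw [if_pos (show 0 < p ∧ 0 < t0 from ⟨hpos, ht⟩), if_neg (by omega)]
          exact ih'
        · -- p ≥ 2, t0 ≥ 1 : the arithmetic case
          have hp2 : 1 < p := by omega
          have hxeq : (if 1 ≤ PySem.Int.mod front p ∧ PySem.Int.mod front p ≤ min t0 (p - 1)
                        then front
                        else if PySem.Int.mod front p = 0 then front + 1
                        else front + (p - PySem.Int.mod front p) + 1) = pvFx p t0 front := rfl
          rw [pvScanA_range p t0 hp2 ht ((back + 1 - front).toNat) front (back + 1) le_rfl,
              if_pos (show 0 < p ∧ 0 < t0 from ⟨hpos, ht⟩),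
              if_pos (show (1:Int) ≤ min t0 (p - 1) from le_min (by omega) (by omega)),
              hxeq]
          by_cases hx : pvFx p t0 front ≤ back
          · rw [if_pos (show pvFx p t0 front < back + 1 by omega), if_pos hx]
          · rw [if_neg (show ¬ pvFx p t0 front < back + 1 by omega), if_neg hx]
            exact ih'
      · -- t0 ≤ 0 : no residue satisfies 0 < r ≤ t0; B skips the scope
        rw [pvScanA_none p t0 (fun x => by omega) ((back + 1 - front).toNat) front (back + 1) le_rfl]
        rw [if_neg (by omega)]
        exact ih'

-- ===== VERDICT (by name: the statement is the Claim_ definition above) =====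
theorem solution_spec : Claim_equal_solution := by
  intro distance scope times _ hpre
  unfold Spec_solution solution solution_alt
  exact pvLoop_eq distance _ (fun z hz =>
    (hpre z ((PySem.List.mem_sorted (scope.zip times) (fun z => (PySem.List.min? z.1 (fun y => y)).getD 0) false z).mp hz)).2.2)
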